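-- pv_equiv track=rewrite | github.com/hgaburton/quantel | quantel/opt/csf_disco.py | _add_pair_moves
-- ===== SOURCE A (Python) =====
-- def _add_pair_moves(sc, prefix):
--     """All unique valid couplings with one extra '+' and one extra '-' inserted.
--
--     When '+' is inserted before '-' (j > i in the extended string) prefix sums
--     in (i, j] rise by 1 — always valid.  When '-' comes first (j <= i) prefix
--     sums in [j, i] drop by 1; valid iff the minimum in that range is >= 1.
--
--     Deduplication in the j > i branch:
--       - Skip insertion point i if sc[i-1] == '+': inserting '+' within a run of
--         consecutive '+'s gives the same result as inserting before the run.
--       - Skip insertion point j if j > i+1 and sc[j-2] == '-': inserting '-'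
--         within a run of consecutive '-'s gives the same result as inserting
--         before the run.
--     """
--     n = len(sc)
--     seen = set()
--
--     # j > i: '+' before '-' — always ballot-valid.
--     for i in range(n + 1):
--         if i > 0 and sc[i - 1] == '+':
--             continue   # duplicate of i-1 for every j > i
--         for j in range(i + 1, n + 2):
--             if j > i + 1 and sc[j - 2] == '-':
--                 continue   # duplicate of j-1 for the same i
--             seen.add(sc[:i] + '+' + sc[i:j - 1] + '-' + sc[j - 1:])
--
--     # j <= i: '-' before '+' — valid iff min(prefix[j:i+1]) >= 1.
--     for i in range(n + 1):
--         for j in range(i + 1):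
--             if min(prefix[j : i + 1]) >= 1:
--                 seen.add(sc[:j] + '-' + sc[j:i] + '+' + sc[i:])
--
--     return seen
-- ===== SOURCE B (Python) =====
-- def _add_pair_moves(sc, prefix):
--     """Same result set, built as single '-'-insertions into the '+'-extended
--     string t = sc[:i]+'+'+sc[i:]; the j <= i validity test replaces the per-pair
--     min(prefix[j:i+1]) scan by a maintained 'last index with prefix < 1' marker."""
--     n = len(sc)
--
--     def ins(t, j):
--         # insert '-' at position j of t
--         return t[:j] + '-' + t[j:]
--
--     seen = set()
--
--     # '+' before '-': always valid; run-dedup expressed as filtered comprehensions.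
--     for i in (i for i in range(n + 1) if i == 0 or sc[i - 1] != '+'):
--         t = sc[:i] + '+' + sc[i:]
--         for j in (j for j in range(i + 1, n + 2) if j == i + 1 or t[j - 1] != '-'):
--             seen.add(ins(t, j))
--
--     # '-' before '+': min(prefix[j:i+1]) >= 1 iff j is past the last index k <= i
--     # with prefix[k] < 1; maintain that index instead of rescanning.
--     last_bad = -1
--     for i in range(n + 1):
--         t = sc[:i] + '+' + sc[i:]
--         if prefix[i] < 1:
--             last_bad = i
--         for j in range(last_bad + 1, i + 1):
--             seen.add(ins(t, j))
--
--     return seen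
-- ===== Notes on version B (the rewrite author's own statement) =====
-- stated objective: faster
-- what changed: B builds every candidate as a single '-'-insertion into the once-built '+'-extended string t = sc[:i]+'+'+sc[i:] (two slices per string instead of three, run-dedup as filtered comprehensions over t), and the j<=i branch replaces the per-pair min(prefix[j:i+1]) rescan by a maintained 'last index with prefix<1' marker that makes the valid j's an explicit range.
import Mathlib
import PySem

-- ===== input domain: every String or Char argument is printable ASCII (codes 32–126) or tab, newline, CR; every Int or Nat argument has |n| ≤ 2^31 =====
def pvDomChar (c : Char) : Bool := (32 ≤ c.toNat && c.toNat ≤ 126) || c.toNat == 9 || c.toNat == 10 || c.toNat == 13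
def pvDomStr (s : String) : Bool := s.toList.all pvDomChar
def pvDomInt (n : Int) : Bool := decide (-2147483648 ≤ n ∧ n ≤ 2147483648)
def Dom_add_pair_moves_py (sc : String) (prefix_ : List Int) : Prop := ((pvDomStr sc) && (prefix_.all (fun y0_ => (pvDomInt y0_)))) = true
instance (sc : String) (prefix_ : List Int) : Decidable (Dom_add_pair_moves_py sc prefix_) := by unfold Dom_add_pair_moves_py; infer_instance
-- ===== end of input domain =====

-- B builds each candidate by one '-'-insertion into the '+'-extended string and replaces A's per-pair min(prefix[j:i+1]) rescan by a maintained last-bad-index marker (faster).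

-- ===== PORT A =====
-- 'min(prefix[j:i+1]) >= 1'; min of an empty slice raises ValueError in Python — those inputs are excluded by Pre_, so the 'none → false' arm is never reached there.
def pvCondA (prefix_ : List Int) (j i : Int) : Bool :=
  match PySem.List.min? (PySem.List.slice prefix_ (some j) (some (i + 1))) (fun x => x) with
  | some m => decide (1 ≤ m)
  | none => false

def add_pair_moves_py (sc : String) (prefix_ : List Int) : List String :=
  let cs := sc.toList
  let n : Int := (cs.length : Int)
  let seen : PySem.Set String := PySem.Set.empty
  -- j > i: '+' before '-'
  let seen := (PySem.List.pyRange 0 (n + 1) 1).foldl (fun seen i =>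
    if 0 < i ∧ PySem.List.pyGet? cs (i - 1) = some '+' then seen
    else (PySem.List.pyRange (i + 1) (n + 2) 1).foldl (fun seen j =>
      if i + 1 < j ∧ PySem.List.pyGet? cs (j - 2) = some '-' then seen
      else PySem.Set.add seen (String.ofList (PySem.List.slice cs none (some i) ++
        '+' :: PySem.List.slice cs (some i) (some (j - 1)) ++
        '-' :: PySem.List.slice cs (some (j - 1)) none))) seen) seen
  -- j <= i: '-' before '+'
  let seen := (PySem.List.pyRange 0 (n + 1) 1).foldl (fun seen i =>
    (PySem.List.pyRange 0 (i + 1) 1).foldl (fun seen j =>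
      if pvCondA prefix_ j i then
        PySem.Set.add seen (String.ofList (PySem.List.slice cs none (some j) ++
          '-' :: PySem.List.slice cs (some j) (some i) ++
          '+' :: PySem.List.slice cs (some i) none))
      else seen) seen) seen
  seen

-- ===== PORT B =====
-- t = sc[:i] + '+' + sc[i:]
def pvPlusAt (cs : List Char) (i : Int) : List Char :=
  PySem.List.slice cs none (some i) ++ '+' :: PySem.List.slice cs (some i) none

-- ins(t, j) = t[:j] + '-' + t[j:]
def pvInsMinus (t : List Char) (j : Int) : String :=
  String.ofList (PySem.List.slice t none (some j) ++ '-' :: PySem.List.slice t (some j) none)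

def add_pair_moves_py_alt (sc : String) (prefix_ : List Int) : List String :=
  let cs := sc.toList
  let n : Int := (cs.length : Int)
  -- '+' before '-': filtered comprehensions over insertion points of t
  let seen := ((PySem.List.pyRange 0 (n + 1) 1).filter
      (fun i => i == 0 || !(PySem.List.pyGet? cs (i - 1) == some '+'))).foldl (fun s i =>
    let t := pvPlusAt cs i
    ((PySem.List.pyRange (i + 1) (n + 2) 1).filter
        (fun j => j == i + 1 || !(PySem.List.pyGet? t (j - 1) == some '-'))).foldl
      (fun s j => PySem.Set.add s (pvInsMinus t j)) s) (PySem.Set.empty : PySem.Set String)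
  -- '-' before '+': maintain last_bad = last index so far whose prefix entry is < 1
  -- (prefix[i] is in range under Pre_; pyGetD's default is never used there)
  let st := (PySem.List.pyRange 0 (n + 1) 1).foldl (fun (st : Int × PySem.Set String) i =>
    let lb := if PySem.List.pyGetD prefix_ i 0 < 1 then i else st.1
    (lb, (PySem.List.pyRange (lb + 1) (i + 1) 1).foldl
        (fun s j => PySem.Set.add s (pvInsMinus (pvPlusAt cs i) j)) st.2)) (-1, seen)
  st.2

-- ===== PRECONDITION & SPEC =====
-- A raises ValueError (min of the empty slice prefix[j:i+1]) exactly when len(prefix) < len(sc)+1; only those inputs are excluded.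
def Pre_add_pair_moves_py (sc : String) (prefix_ : List Int) : Prop :=
  sc.toList.length + 1 ≤ prefix_.length
instance (sc : String) (prefix_ : List Int) : Decidable (Pre_add_pair_moves_py sc prefix_) := by unfold Pre_add_pair_moves_py; infer_instance
def pvWitness_add_pair_moves_py : String × List Int := ("+-", [1, 1, 0])

def Spec_add_pair_moves_py (sc : String) (prefix_ : List Int) (out : List String) : Prop := out = add_pair_moves_py_alt sc prefix_
instance (sc : String) (prefix_ : List Int) (out : List String) : Decidable (Spec_add_pair_moves_py sc prefix_ out) := by unfold Spec_add_pair_moves_py; infer_instance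

-- ===== CLAIM (what is proved, stated in full; the proofs are below) =====
def Claim_equal_add_pair_moves_py : Prop := ∀ (sc : String) (prefix_ : List Int), Dom_add_pair_moves_py sc prefix_ → Pre_add_pair_moves_py sc prefix_ → Spec_add_pair_moves_py sc prefix_ (add_pair_moves_py sc prefix_)

-- ===== LEMMAS AND PROOFS =====

-- Indexing past the inserted '+': t[m] = cs[m-1] for m ≥ i+1.
theorem pyGet?_pvPlusAt_high (cs : List Char) (i m : Int) (h0 : 0 ≤ i)
    (hin : i ≤ (cs.length : Int)) (hm : i + 1 ≤ m) :
    PySem.List.pyGet? (pvPlusAt cs i) m = PySem.List.pyGet? cs (m - 1) := by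
  obtain ⟨k, rfl⟩ : ∃ k : Nat, m = (k : Int) := ⟨m.toNat, by omega⟩
  unfold pvPlusAt
  rw [PySem.List.slice_to _ h0, PySem.List.slice_from _ h0,
    show ((k : Int) - 1) = ((k - 1 : Nat) : Int) from by omega,
    PySem.List.pyGet?_natCast, PySem.List.pyGet?_natCast]
  have hlen : (cs.take i.toNat).length = i.toNat := by
    rw [List.length_take]; omega
  rw [List.getElem?_append_right (by omega)]
  rw [hlen]
  have : k - i.toNat = (k - i.toNat - 1) + 1 := by omega
  rw [this, List.getElem?_cons_succ, List.getElem?_drop]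
  congr 1
  omega

-- Insertion of '-' after the '+' (position j ≥ i+1 of t) is A's three-slice string.
theorem pvIns_high (cs : List Char) (i j : Int) (h0 : 0 ≤ i)
    (hin : i ≤ (cs.length : Int)) (hj : i + 1 ≤ j) :
    pvInsMinus (pvPlusAt cs i) j =
    String.ofList (PySem.List.slice cs none (some i) ++
      '+' :: PySem.List.slice cs (some i) (some (j - 1)) ++
      '-' :: PySem.List.slice cs (some (j - 1)) none) := by
  unfold pvInsMinus pvPlusAt
  rw [PySem.List.slice_to _ h0, PySem.List.slice_from _ h0,
    PySem.List.slice_to _ (by omega : (0:Int) ≤ j),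
    PySem.List.slice_from _ (by omega : (0:Int) ≤ j),
    PySem.List.slice_toNat cs h0 (by omega : (0:Int) ≤ j - 1),
    PySem.List.slice_from _ (by omega : (0:Int) ≤ j - 1)]
  have hlen : (cs.take i.toNat).length = i.toNat := by rw [List.length_take]; omega
  have h1 : (cs.take i.toNat ++ '+' :: cs.drop i.toNat).take j.toNat
      = cs.take i.toNat ++ '+' :: (cs.drop i.toNat).take ((j - 1).toNat - i.toNat) := by
    rw [List.take_append, List.take_of_length_le (by omega), hlen]
    congr 1
    have : j.toNat - i.toNat = ((j - 1).toNat - i.toNat) + 1 := by omega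
    rw [this, List.take_succ_cons]
  have h2 : (cs.take i.toNat ++ '+' :: cs.drop i.toNat).drop j.toNat
      = cs.drop (j - 1).toNat := by
    rw [List.drop_append, List.drop_of_length_le (by omega), hlen,
      List.nil_append]
    have : j.toNat - i.toNat = (j.toNat - i.toNat - 1) + 1 := by omega
    rw [this, List.drop_succ_cons, List.drop_drop]
    congr 1
    omega
  rw [h1, h2, List.append_assoc, List.cons_append]

-- Insertion of '-' before the '+' (position j ≤ i of t) is A's second-loop string.
theorem pvIns_low (cs : List Char) (i j : Int) (h0 : 0 ≤ j) (hji : j ≤ i)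
    (hin : i ≤ (cs.length : Int)) :
    pvInsMinus (pvPlusAt cs i) j =
    String.ofList (PySem.List.slice cs none (some j) ++
      '-' :: PySem.List.slice cs (some j) (some i) ++
      '+' :: PySem.List.slice cs (some i) none) := by
  unfold pvInsMinus pvPlusAt
  rw [PySem.List.slice_to _ (by omega : (0:Int) ≤ i),
    PySem.List.slice_from _ (by omega : (0:Int) ≤ i),
    PySem.List.slice_to _ h0, PySem.List.slice_from _ h0,
    PySem.List.slice_to cs h0,
    PySem.List.slice_toNat cs h0 (by omega : (0:Int) ≤ i)]
  have hlen : (cs.take i.toNat).length = i.toNat := by rw [List.length_take]; omega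
  have h1 : (cs.take i.toNat ++ '+' :: cs.drop i.toNat).take j.toNat
      = cs.take j.toNat := by
    rw [List.take_append, List.take_take,
      Nat.sub_eq_zero_of_le (by omega), List.take_zero, List.append_nil,
      Nat.min_eq_left (by omega)]
  have h2 : (cs.take i.toNat ++ '+' :: cs.drop i.toNat).drop j.toNat
      = (cs.drop j.toNat).take (i.toNat - j.toNat) ++ '+' :: cs.drop i.toNat := by
    rw [List.drop_append, hlen, Nat.sub_eq_zero_of_le (by omega),
      List.drop_zero, List.drop_take]
  rw [h1, h2]
  simp

-- The first loops: A's guarded scan equals B's filtered-comprehension scan.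
theorem add_pair_moves_loop1_eq (cs : List Char) (seen : PySem.Set String) :
    (PySem.List.pyRange 0 ((cs.length : Int) + 1) 1).foldl (fun seen i =>
      if 0 < i ∧ PySem.List.pyGet? cs (i - 1) = some '+' then seen
      else (PySem.List.pyRange (i + 1) ((cs.length : Int) + 2) 1).foldl (fun seen j =>
        if i + 1 < j ∧ PySem.List.pyGet? cs (j - 2) = some '-' then seen
        else PySem.Set.add seen (String.ofList (PySem.List.slice cs none (some i) ++
          '+' :: PySem.List.slice cs (some i) (some (j - 1)) ++
          '-' :: PySem.List.slice cs (some (j - 1)) none))) seen) seen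
    = ((PySem.List.pyRange 0 ((cs.length : Int) + 1) 1).filter
        (fun i => i == 0 || !(PySem.List.pyGet? cs (i - 1) == some '+'))).foldl (fun s i =>
      let t := pvPlusAt cs i
      ((PySem.List.pyRange (i + 1) ((cs.length : Int) + 2) 1).filter
          (fun j => j == i + 1 || !(PySem.List.pyGet? t (j - 1) == some '-'))).foldl
        (fun s j => PySem.Set.add s (pvInsMinus t j)) s) seen := by
  rw [← PySem.List.foldl_if_eq_foldl_filter]
  apply PySem.List.foldl_congr_mem
  intro acc i hi
  have hi' := PySem.List.mem_pyRange_one.mp hi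
  simp only []
  by_cases hc : 0 < i ∧ PySem.List.pyGet? cs (i - 1) = some '+'
  · rw [if_pos hc, if_neg ?_]
    simp only [Bool.or_eq_true, beq_iff_eq, Bool.not_eq_true', beq_eq_false_iff_ne, ne_eq]
    push Not
    exact ⟨by omega, hc.2⟩
  · rw [if_neg hc, if_pos ?_, ← PySem.List.foldl_if_eq_foldl_filter]
    · apply PySem.List.foldl_congr_mem
      intro acc' j hj
      have hj' := PySem.List.mem_pyRange_one.mp hj
      by_cases hc2 : i + 1 < j ∧ PySem.List.pyGet? cs (j - 2) = some '-'
      · rw [if_pos hc2, if_neg ?_]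
        simp only [Bool.or_eq_true, beq_iff_eq, Bool.not_eq_true', beq_eq_false_iff_ne, ne_eq]
        push Not
        refine ⟨by omega, ?_⟩
        rw [pyGet?_pvPlusAt_high cs i (j - 1) (by omega) (by omega) (by omega),
          show j - 1 - 1 = j - 2 from by omega]
        exact hc2.2
      · rw [if_neg hc2, if_pos ?_, pvIns_high cs i j (by omega) (by omega) (by omega)]
        simp only [Bool.or_eq_true, beq_iff_eq, Bool.not_eq_true', beq_eq_false_iff_ne, ne_eq]
        by_cases hz : j = i + 1
        · exact Or.inl hz
        · refine Or.inr ?_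
          rw [pyGet?_pvPlusAt_high cs i (j - 1) (by omega) (by omega) (by omega),
            show j - 1 - 1 = j - 2 from by omega]
          exact fun hg => hc2 ⟨by omega, hg⟩
    · simp only [Bool.or_eq_true, beq_iff_eq, Bool.not_eq_true', beq_eq_false_iff_ne, ne_eq]
      by_cases hz : i = 0
      · exact Or.inl hz
      · exact Or.inr fun hg => hc ⟨by omega, hg⟩

-- 'min(prefix[j:i+1]) >= 1' says: no entry of prefix with index in [j, i] is < 1.
theorem pvCondA_char (prefix_ : List Int) (j a : Int) (h0 : 0 ≤ j) (hja : j ≤ a)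
    (ha : a < (prefix_.length : Int)) :
    pvCondA prefix_ j a = true ↔ ∀ t : Int, j ≤ t → t ≤ a → ¬ PySem.List.pyGetD prefix_ t 0 < 1 := by
  unfold pvCondA
  rw [PySem.List.slice_toNat prefix_ h0 (by omega)]
  set L := List.take ((a + 1).toNat - j.toNat) (List.drop j.toNat prefix_) with hL
  have hlen : L.length = (a + 1).toNat - j.toNat := by
    rw [hL, List.length_take, List.length_drop]; omega
  have hget : ∀ (t : Nat), t < L.length →
      L[t]? = some (PySem.List.pyGetD prefix_ (j + (t : Int)) 0) := by
    intro t ht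
    have hjt : j.toNat + t < prefix_.length := by omega
    rw [hL, List.getElem?_take_of_lt (by omega), List.getElem?_drop,
      List.getElem?_eq_getElem hjt,
      PySem.List.pyGetD_eq_getElem prefix_ 0 (by omega) (by omega)]
    have hidx : (j + (t : Int)).toNat = j.toNat + t := by omega
    simp [hidx]
  cases hmin : PySem.List.min? L (fun x => x) with
  | none =>
    exact absurd ((PySem.List.min?_eq_none_iff L _).mp hmin)
      (by intro h; rw [h] at hlen; simp at hlen; omega)
  | some m =>
    have hmem := PySem.List.min?_mem hmin
    have hmm := PySem.List.min?_isMin hmin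
    simp only [decide_eq_true_eq]
    constructor
    · intro h1 t htj hta hlt
      have hidx : t.toNat - j.toNat < L.length := by omega
      have hEl := hget (t.toNat - j.toNat) hidx
      rw [show j + ((t.toNat - j.toNat : Nat) : Int) = t from by omega] at hEl
      have := hmm _ (List.mem_of_getElem? hEl)
      simp only at this
      omega
    · intro hall
      obtain ⟨t, ht⟩ := List.getElem?_of_mem hmem
      have htl : t < L.length := (List.getElem?_eq_some_iff.mp ht).1
      have hT := hall (j + (t : Int)) (by omega) (by omega)
      have := hget t htl
      rw [ht] at this
      rw [← Option.some_inj.mp this] at hT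
      omega

-- A's guarded inner scan over j ∈ [0, i] equals B's unguarded scan over j ∈ [last_bad+1, i].
theorem inner2_eq (prefix_ : List Int) (S : Int → String) (a lb : Int)
    (_h0a : 0 ≤ a) (ha : a < (prefix_.length : Int)) (hlb1 : -1 ≤ lb) (hlba : lb ≤ a)
    (hgood : ∀ t : Int, lb < t → t ≤ a → ¬ PySem.List.pyGetD prefix_ t 0 < 1)
    (hbad : lb = -1 ∨ PySem.List.pyGetD prefix_ lb 0 < 1)
    (seen : PySem.Set String) :
    (PySem.List.pyRange 0 (a + 1) 1).foldl
      (fun s j => if pvCondA prefix_ j a then PySem.Set.add s (S j) else s) seen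
    = (PySem.List.pyRange (lb + 1) (a + 1) 1).foldl
      (fun s j => PySem.Set.add s (S j)) seen := by
  rw [PySem.List.foldl_if_eq_foldl_filter]
  congr 1
  rw [List.filter_congr (q := fun j => decide (lb + 1 ≤ j)) ?_]
  · rw [PySem.List.pyRange_one_append 0 (lb + 1) (a + 1) (by omega) (by omega), List.filter_append]
    rw [List.filter_eq_nil_iff.mpr ?h1, List.filter_eq_self.mpr ?h2, List.nil_append]
    case h1 =>
      intro x hx
      have := PySem.List.mem_pyRange_one.mp hx
      simp only [decide_eq_true_eq]
      omega
    case h2 =>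
      intro x hx
      have := PySem.List.mem_pyRange_one.mp hx
      simp only [decide_eq_true_eq]
      omega
  · intro j hj
    have hjm := PySem.List.mem_pyRange_one.mp hj
    have hchar := pvCondA_char prefix_ j a hjm.1 (by omega) ha
    by_cases hc : lb + 1 ≤ j
    · have hT : pvCondA prefix_ j a = true := hchar.mpr (fun t htj hta => hgood t (by omega) hta)
      rw [hT]
      simp [hc]
    · have hbad' : PySem.List.pyGetD prefix_ lb 0 < 1 := by
        rcases hbad with h | h
        · omega
        · exact h
      have hF : pvCondA prefix_ j a = false := by
        cases hcc : pvCondA prefix_ j a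
        · rfl
        · exact absurd hbad' (hchar.mp hcc lb (by omega) hlba)
      rw [hF]
      simp [hc]

-- The second loops: A's outer pass equals B's marker-carrying pass, by induction along the range;
-- SB is B's insertion-built string, S is A's slice-built one, equal on the positions B visits.
theorem loop2_aux (prefix_ : List Int) (S SB : Int → Int → String) (n : Int)
    (_hn : 0 ≤ n) (hpre : n < (prefix_.length : Int))
    (hSB : ∀ j i : Int, 0 ≤ j → j ≤ i → i ≤ n → SB j i = S j i) :
    ∀ (k : Nat) (a lb : Int) (seen : PySem.Set String),
    a + (k : Int) = n + 1 → 0 ≤ a → -1 ≤ lb → lb < a →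
    (∀ t : Int, lb < t → t < a → ¬ PySem.List.pyGetD prefix_ t 0 < 1) →
    (lb = -1 ∨ PySem.List.pyGetD prefix_ lb 0 < 1) →
    (PySem.List.pyRange a (n + 1) 1).foldl (fun seen i =>
      (PySem.List.pyRange 0 (i + 1) 1).foldl (fun s j =>
        if pvCondA prefix_ j i then PySem.Set.add s (S j i) else s) seen) seen
    = ((PySem.List.pyRange a (n + 1) 1).foldl (fun (st : Int × PySem.Set String) i =>
        let lb := if PySem.List.pyGetD prefix_ i 0 < 1 then i else st.1
        (lb, (PySem.List.pyRange (lb + 1) (i + 1) 1).foldl (fun s j =>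
          PySem.Set.add s (SB j i)) st.2)) (lb, seen)).2 := by
  intro k
  induction k with
  | zero =>
    intro a lb seen hk _ _ _ _ _
    rw [PySem.List.pyRange_one_eq_nil (by omega)]
    rfl
  | succ k ih =>
    intro a lb seen hk h0a hlb1 hlba hgood hbad
    have han : a ≤ n := by omega
    rw [PySem.List.pyRange_one_cons (by omega)]
    simp only [List.foldl_cons]
    have hinner : ∀ (lb' : Int) (s : PySem.Set String), -1 ≤ lb' →
        (PySem.List.pyRange (lb' + 1) (a + 1) 1).foldl (fun s j => PySem.Set.add s (SB j a)) s
        = (PySem.List.pyRange (lb' + 1) (a + 1) 1).foldl (fun s j => PySem.Set.add s (S j a)) s := by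
      intro lb' s hlb'
      apply PySem.List.foldl_congr_mem
      intro acc j hj
      have hjm := PySem.List.mem_pyRange_one.mp hj
      rw [hSB j a (by omega) (by omega) (by omega)]
    by_cases hba : PySem.List.pyGetD prefix_ a 0 < 1
    · rw [inner2_eq prefix_ (fun j => S j a) a a h0a (by omega) (by omega) le_rfl
        (fun t ht1 ht2 => by omega) (Or.inr hba)]
      simp only [if_pos hba]
      rw [← hinner a seen (by omega)]
      exact ih (a + 1) a _ (by omega) (by omega) (by omega) (by omega)
        (fun t ht1 ht2 => by omega) (Or.inr hba)
    · rw [inner2_eq prefix_ (fun j => S j a) a lb h0a (by omega) hlb1 (by omega)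
        (fun t ht1 ht2 => by
          by_cases hta : t = a
          · exact hta ▸ hba
          · exact hgood t ht1 (by omega)) hbad]
      simp only [if_neg hba]
      rw [← hinner lb seen hlb1]
      exact ih (a + 1) lb _ (by omega) (by omega) hlb1 (by omega)
        (fun t ht1 ht2 => by
          by_cases hta : t = a
          · exact hta ▸ hba
          · exact hgood t ht1 (by omega)) hbad

theorem add_pair_moves_loop2_eq (cs : List Char) (prefix_ : List Int) (seen : PySem.Set String)
    (hpre : cs.length + 1 ≤ prefix_.length) :
    (PySem.List.pyRange 0 ((cs.length : Int) + 1) 1).foldl (fun seen i =>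
      (PySem.List.pyRange 0 (i + 1) 1).foldl (fun seen j =>
        if pvCondA prefix_ j i then
          PySem.Set.add seen (String.ofList (PySem.List.slice cs none (some j) ++
            '-' :: PySem.List.slice cs (some j) (some i) ++
            '+' :: PySem.List.slice cs (some i) none))
        else seen) seen) seen
    = ((PySem.List.pyRange 0 ((cs.length : Int) + 1) 1).foldl (fun (st : Int × PySem.Set String) i =>
      let lb := if PySem.List.pyGetD prefix_ i 0 < 1 then i else st.1
      (lb, (PySem.List.pyRange (lb + 1) (i + 1) 1).foldl (fun seen j =>
        PySem.Set.add seen (pvInsMinus (pvPlusAt cs i) j)) st.2)) (-1, seen)).2 := by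
  exact loop2_aux prefix_
    (fun j i => String.ofList (PySem.List.slice cs none (some j) ++
      '-' :: PySem.List.slice cs (some j) (some i) ++
      '+' :: PySem.List.slice cs (some i) none))
    (fun j i => pvInsMinus (pvPlusAt cs i) j)
    (cs.length : Int) (by omega) (by exact_mod_cast by omega)
    (fun j i h0 hji hin => pvIns_low cs i j h0 hji hin)
    (cs.length + 1) 0 (-1) seen (by omega) le_rfl (by omega) (by omega)
    (fun t ht1 ht2 => by omega) (Or.inl rfl)

-- ===== VERDICT (by name: the statement is the Claim_ definition above) =====
theorem add_pair_moves_py_spec : Claim_equal_add_pair_moves_py := by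
  intro sc prefix_ _hdom hpre
  unfold Spec_add_pair_moves_py
  simp only [add_pair_moves_py, add_pair_moves_py_alt]
  rw [add_pair_moves_loop1_eq, add_pair_moves_loop2_eq _ _ _ hpre]
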